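-- pv_equiv track=rewrite | github.com/Padala-Rithvik-Reddy/Innovators-Inc. | keystroke_module.py | split_commands
-- ===== SOURCE A (Python) =====
-- COMMANDS = {"open", "search", "play"}
--
-- def split_commands(command_list):
--     """Splits the command list into structured tasks based on command keywords."""
--     tasks = []
--     current_task = []
--     for word in command_list:
--         if word in COMMANDS:
--             if current_task:
--                 tasks.append(current_task)
--             current_task = [word]
--         else:
--             current_task.append(word)
--     if current_task:
--         tasks.append(current_task)
--     return tasks
-- ===== SOURCE B (Python) =====
-- COMMANDS = {"open", "search", "play"}
--
-- def split_commands(command_list):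
--     """Splits the command list into structured tasks based on command keywords."""
--     bounds = [i for i, w in enumerate(command_list) if w in COMMANDS]
--     out = []
--     if command_list and (not bounds or bounds[0] > 0):
--         out.append(command_list[:bounds[0]] if bounds else command_list[:])
--     for b, e in zip(bounds, bounds[1:] + [len(command_list)]):
--         out.append(command_list[b:e])
--     return out
-- ===== Notes on version B (the rewrite author's own statement) =====
-- stated objective: alternative
-- what changed: Replaces A's stateful accumulator loop (current_task grown word by word, flushed at each keyword) by a boundary-index computation: collect the indices of command keywords once, then emit the groups as slices between consecutive boundaries (plus a non-empty leading slice).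
import Mathlib
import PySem

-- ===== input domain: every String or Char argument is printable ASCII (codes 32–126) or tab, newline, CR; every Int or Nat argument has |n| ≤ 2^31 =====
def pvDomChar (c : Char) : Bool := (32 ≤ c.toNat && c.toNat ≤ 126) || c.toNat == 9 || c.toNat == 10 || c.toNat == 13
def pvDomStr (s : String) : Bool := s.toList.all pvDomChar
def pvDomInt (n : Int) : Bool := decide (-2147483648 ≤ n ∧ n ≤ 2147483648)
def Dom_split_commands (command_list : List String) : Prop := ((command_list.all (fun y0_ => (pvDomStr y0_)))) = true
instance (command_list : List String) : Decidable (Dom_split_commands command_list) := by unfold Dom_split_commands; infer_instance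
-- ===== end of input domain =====

-- B replaces A's stateful accumulator loop by computing the command-keyword boundary indices once
-- and emitting the groups as slices between consecutive boundaries (objective: alternative decomposition, same cost).

-- ===== PORT A =====
def COMMANDS : PySem.Set String := PySem.Set.ofList ["open", "search", "play"]

def split_commands (command_list : List String) : List (List String) :=
  let st := command_list.foldl
    (fun (st : List (List String) × List String) word =>
      if PySem.Set.contains COMMANDS word then
        ((if st.2 ≠ [] then st.1 ++ [st.2] else st.1), [word])
      else
        (st.1, st.2 ++ [word]))
    ([], [])
  if st.2 ≠ [] then st.1 ++ [st.2] else st.1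

-- ===== PORT B =====
def split_commands_alt (command_list : List String) : List (List String) :=
  let bounds : List Int :=
    ((PySem.List.enumerate command_list).filter
      (fun p => PySem.Set.contains COMMANDS p.2)).map (·.1)
  let lead : List (List String) :=
    if command_list ≠ [] ∧ (bounds = [] ∨ bounds.headD 0 > 0) then
      [match bounds with
       | [] => PySem.List.slice command_list none none
       | b :: _ => PySem.List.slice command_list none (some b)]
    else []
  lead ++
    (bounds.zip (PySem.List.slice bounds (some 1) none ++ [(command_list.length : Int)])).map
      (fun p => PySem.List.slice command_list (some p.1) (some p.2))

-- ===== PRECONDITION & SPEC =====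
def Spec_split_commands (command_list : List String) (out : List (List String)) : Prop := out = split_commands_alt command_list
instance (command_list : List String) (out : List (List String)) : Decidable (Spec_split_commands command_list out) := by unfold Spec_split_commands; infer_instance

-- ===== CLAIM (what is proved, stated in full; the proofs are below) =====
def Claim_equal_split_commands : Prop := ∀ (command_list : List String), Dom_split_commands command_list → Spec_split_commands command_list (split_commands command_list)

-- ===== LEMMAS AND PROOFS =====

-- q w = "w is NOT a command keyword" (the takeWhile predicate of the common spec)
def pvQ (w : String) : Bool := !(PySem.Set.contains COMMANDS w)

-- common specification: blocks each headed by a keyword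
def pvBlocks : List String → List (List String)
  | [] => []
  | c :: t => (c :: t.takeWhile pvQ) :: pvBlocks (t.dropWhile pvQ)
termination_by l => l.length
decreasing_by
  simp
  exact List.length_dropWhile_le pvQ t

theorem pvBlocks_nil : pvBlocks [] = [] := by simp [pvBlocks]

theorem pvBlocks_cons (c : String) (t : List String) :
    pvBlocks (c :: t) = (c :: t.takeWhile pvQ) :: pvBlocks (t.dropWhile pvQ) := by
  simp [pvBlocks]

-- common specification: optional leading non-command block followed by the keyword blocks
def pvSpec (l : List String) : List (List String) :=
  (if l.takeWhile pvQ = [] then [] else [l.takeWhile pvQ]) ++ pvBlocks (l.dropWhile pvQ)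

-- A's loop body and final flush, named for the proofs
def pvStep (st : List (List String) × List String) (word : String) :
    List (List String) × List String :=
  if PySem.Set.contains COMMANDS word then
    ((if st.2 ≠ [] then st.1 ++ [st.2] else st.1), [word])
  else
    (st.1, st.2 ++ [word])

def pvFinish (st : List (List String) × List String) : List (List String) :=
  if st.2 ≠ [] then st.1 ++ [st.2] else st.1

theorem pvA_def (l : List String) :
    split_commands l = pvFinish (l.foldl pvStep ([], [])) := rfl

theorem pvA_fold (l : List String) : ∀ (ts : List (List String)) (cur : List String),
    pvFinish (l.foldl pvStep (ts, cur)) =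
      ts ++ (if cur ++ l.takeWhile pvQ = [] then [] else [cur ++ l.takeWhile pvQ])
        ++ pvBlocks (l.dropWhile pvQ) := by
  induction l with
  | nil =>
    intro ts cur
    by_cases h : cur = [] <;> simp [pvFinish, h, pvBlocks_nil]
  | cons w t ih =>
    intro ts cur
    by_cases hw : PySem.Set.contains COMMANDS w
    · have hm : w ∈ COMMANDS := by simpa using hw
      have hq : pvQ w = false := by simp [pvQ, hm]
      simp only [List.foldl_cons, pvStep, hw, if_true, List.takeWhile_cons, List.dropWhile_cons,
        hq, Bool.false_eq_true, if_false]
      rw [ih, pvBlocks_cons]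
      by_cases hc : cur = [] <;> simp [hc]
    · have hm : w ∉ COMMANDS := by simpa using hw
      have hq : pvQ w = true := by simp [pvQ, hm]
      simp only [List.foldl_cons, pvStep, hw, Bool.false_eq_true, if_false, List.takeWhile_cons,
        List.dropWhile_cons, hq, if_true]
      rw [ih]
      simp

theorem pvA_eq_spec (l : List String) : split_commands l = pvSpec l := by
  rw [pvA_def, pvA_fold l [] []]
  simp [pvSpec]

-- the bounds list of B, parameterised by the enumerate start
def pvBounds (l : List String) (s : Int) : List Int :=
  ((PySem.List.enumerate l s).filter (fun p => PySem.Set.contains COMMANDS p.2)).map (·.1)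

theorem pvBounds_nil (s : Int) : pvBounds [] s = [] := rfl

theorem pvBounds_cons (w : String) (t : List String) (s : Int) :
    pvBounds (w :: t) s =
      (if PySem.Set.contains COMMANDS w then [s] else []) ++ pvBounds t (s + 1) := by
  by_cases h : w ∈ COMMANDS
  · simp [pvBounds, PySem.List.enumerate_cons, h]
  · simp [pvBounds, PySem.List.enumerate_cons, h]

theorem pvBounds_append_noncmd (p r : List String) (s : Int)
    (hp : ∀ w ∈ p, pvQ w = true) :
    pvBounds (p ++ r) s = pvBounds r (s + p.length) := by
  induction p generalizing s with
  | nil => simp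
  | cons w tp ih =>
    have hw' : PySem.Set.contains COMMANDS w = false := by
      have := hp w (by simp); simpa [pvQ] using this
    rw [List.cons_append, pvBounds_cons, hw']
    simp only [Bool.false_eq_true, if_false, List.nil_append]
    rw [ih (s + 1) (fun x hx => hp x (by simp [hx]))]
    congr 1
    simp [List.length_cons]
    omega

-- the word at a boundary, read off a drop equation
theorem pvDrop_head (l : List String) (b : ℕ) (c : String) (t : List String)
    (h : l.drop b = c :: t) : l.getD b "" = c := by
  have h1 : l[b]? = some c := by
    rw [← List.head?_drop, h]; rfl
  simp [List.getD, h1]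

theorem pvDropWhile_head (p : String → Bool) (l : List String) (c : String) (t : List String)
    (h : l.dropWhile p = c :: t) : p c = false := by
  induction l with
  | nil => simp at h
  | cons x xs ih =>
    by_cases hx : p x
    · rw [List.dropWhile_cons, if_pos hx] at h
      exact ih h
    · rw [List.dropWhile_cons, if_neg hx] at h
      obtain ⟨rfl, -⟩ := List.cons.injEq .. ▸ h
      simpa using hx

-- the slice loop of B, run from a boundary b, yields the keyword blocks of the suffix
theorem pvLoop (n : ℕ) : ∀ (t l : List String) (b : ℕ), t.length ≤ n →
    l.drop (b + 1) = t → PySem.Set.contains COMMANDS (l.getD b "") = true →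
    ((((b : Int) :: pvBounds t ((b : Int) + 1)).zip
        (pvBounds t ((b : Int) + 1) ++ [(l.length : Int)])).map
      (fun p => PySem.List.slice l (some p.1) (some p.2)))
    = pvBlocks (l.getD b "" :: t) := by
  induction n with
  | zero =>
    intro t l b hn ht hc
    have ht0 : t = [] := List.eq_nil_of_length_eq_zero (Nat.le_zero.mp hn)
    subst ht0
    have hb : b < l.length := by
      by_contra h
      rw [List.getD_eq_default l "" (by omega)] at hc
      exact absurd hc (by decide)
    rw [pvBounds_nil]
    simp only [List.zip_cons_cons, List.zip_nil_left, List.map_cons, List.map_nil,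
      List.nil_append]
    rw [PySem.List.slice_natCast, List.take_of_length_le (by simp)]
    rw [List.drop_eq_getElem_cons hb, ht, List.getD_eq_getElem l "" hb]
    rw [pvBlocks_cons]
    simp [pvBlocks_nil]
  | succ n ih =>
    intro t l b hn ht hc
    have hb : b < l.length := by
      by_contra h
      rw [List.getD_eq_default l "" (by omega)] at hc
      exact absurd hc (by decide)
    have hsplit : t.takeWhile pvQ ++ t.dropWhile pvQ = t := List.takeWhile_append_dropWhile
    set p' := t.takeWhile pvQ with hp'def
    have hp' : ∀ w ∈ p', pvQ w = true := fun w hw => List.mem_takeWhile_imp hw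
    match hr : t.dropWhile pvQ with
    | [] =>
      have htp : t = p' := by rw [← hsplit, hr, List.append_nil]
      have hbounds : pvBounds t ((b : Int) + 1) = [] := by
        rw [htp, ← List.append_nil p', pvBounds_append_noncmd p' [] _ hp', pvBounds_nil]
      rw [hbounds]
      simp only [List.zip_cons_cons, List.zip_nil_left, List.map_cons, List.map_nil,
        List.nil_append]
      rw [PySem.List.slice_natCast, List.take_of_length_le (by simp)]
      rw [List.drop_eq_getElem_cons hb, ht, List.getD_eq_getElem l "" hb]
      rw [pvBlocks_cons, hr, pvBlocks_nil]
      have : t.takeWhile pvQ = t := by rw [← hp'def, ← htp]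
      rw [this]
    | c' :: t'' =>
      have hqc' : pvQ c' = false := pvDropWhile_head pvQ t c' t'' hr
      have hcc' : PySem.Set.contains COMMANDS c' = true := by
        simpa [pvQ] using hqc'
      have htdecomp : t = p' ++ c' :: t'' := by rw [← hsplit, hr]
      -- the next boundary
      have hdropb' : l.drop (b + 1 + p'.length) = c' :: t'' := by
        have he : l.drop (b + 1 + p'.length) = (l.drop (b + 1)).drop p'.length := by
          rw [List.drop_drop]
        rw [he, ht, htdecomp, List.drop_left]
      have hdropb'1 : l.drop (b + 1 + p'.length + 1) = t'' := by
        have he : l.drop (b + 1 + p'.length + 1) = (l.drop (b + 1 + p'.length)).drop 1 := by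
          rw [List.drop_drop]
        rw [he, hdropb', List.drop_one, List.tail_cons]
      have hgetb' : l.getD (b + 1 + p'.length) "" = c' := pvDrop_head l _ c' t'' hdropb'
      have hbounds : pvBounds t ((b : Int) + 1) =
          ((b + 1 + p'.length : ℕ) : Int) :: pvBounds t'' (((b + 1 + p'.length : ℕ) : Int) + 1) := by
        rw [htdecomp, pvBounds_append_noncmd p' _ _ hp', pvBounds_cons, hcc']
        have h1 : (b : Int) + 1 + (p'.length : Int) = ((b + 1 + p'.length : ℕ) : Int) := by
          push_cast; ring
        rw [h1]
        simp
      rw [hbounds]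
      simp only [List.cons_append, List.zip_cons_cons, List.map_cons]
      -- first slice: l[b : b'] = l.getD b "" :: p'
      have hslice1 : PySem.List.slice l (some (b : Int)) (some ((b + 1 + p'.length : ℕ) : Int)) =
          l.getD b "" :: p' := by
        rw [PySem.List.slice_natCast]
        rw [List.drop_eq_getElem_cons hb, ht, List.getD_eq_getElem l "" hb]
        have hlen : (b + 1 + p'.length) - b = p'.length + 1 := by omega
        rw [hlen, List.take_succ_cons]
        congr 1
        rw [htdecomp, ← List.prefix_iff_eq_take.mp]
        exact List.IsPrefix.trans (List.prefix_refl p') ⟨c' :: t'', rfl⟩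
      rw [hslice1]
      have hrec := ih t'' l (b + 1 + p'.length)
        (by have : t''.length < t.length := by rw [htdecomp]; simp; omega
            omega)
        hdropb'1
        (by rw [hgetb']; exact hcc')
      rw [hrec, hgetb']
      rw [pvBlocks_cons (l.getD b "") t, htdecomp]
      have htake : (p' ++ c' :: t'').takeWhile pvQ = p' := by
        rw [← htdecomp, ← hp'def]
      have hdrop : (p' ++ c' :: t'').dropWhile pvQ = c' :: t'' := by
        rw [← htdecomp, hr]
      rw [htake, hdrop, pvBlocks_cons]

theorem pvB_def (l : List String) :
    split_commands_alt l =
      (if l ≠ [] ∧ (pvBounds l 0 = [] ∨ (pvBounds l 0).headD 0 > 0) then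
        [match pvBounds l 0 with
         | [] => PySem.List.slice l none none
         | b :: _ => PySem.List.slice l none (some b)]
      else []) ++
      ((pvBounds l 0).zip
          (PySem.List.slice (pvBounds l 0) (some 1) none ++ [(l.length : Int)])).map
        (fun p => PySem.List.slice l (some p.1) (some p.2)) := rfl

theorem pvB_eq_spec (l : List String) : split_commands_alt l = pvSpec l := by
  rw [pvB_def]
  have hsplit : l.takeWhile pvQ ++ l.dropWhile pvQ = l := List.takeWhile_append_dropWhile
  set P := l.takeWhile pvQ with hPdef
  have hP : ∀ w ∈ P, pvQ w = true := fun w hw => List.mem_takeWhile_imp hw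
  match hr : l.dropWhile pvQ with
  | [] =>
    have hlP : l = P := by rw [← hsplit, hr, List.append_nil]
    have hb : pvBounds l 0 = [] := by
      rw [hlP, ← List.append_nil P, pvBounds_append_noncmd P [] _ hP, pvBounds_nil]
    rw [hb]
    rcases eq_or_ne l [] with hl | hl
    · subst hl
      simp [pvSpec, pvBlocks_nil]
    · simp only [hl, ne_eq, not_false_eq_true, true_and, gt_iff_lt, List.headD_nil,
        List.zip_nil_left, List.map_nil, List.append_nil]
      rw [PySem.List.slice_none_none]
      unfold pvSpec
      rw [← hPdef, ← hlP, hr, pvBlocks_nil]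
      simp [hl]
  | c :: t =>
    have hldecomp : l = P ++ c :: t := by rw [← hsplit, hr]
    have hqc : pvQ c = false := pvDropWhile_head pvQ l c t hr
    have hcc : PySem.Set.contains COMMANDS c = true := by simpa [pvQ] using hqc
    have hln : l ≠ [] := by rw [hldecomp]; simp
    have hb : pvBounds l 0 = ((P.length : ℕ) : Int) :: pvBounds t (((P.length : ℕ) : Int) + 1) := by
      rw [hldecomp, pvBounds_append_noncmd P _ _ hP, pvBounds_cons, hcc]
      have h1 : (0 : Int) + (P.length : Int) = ((P.length : ℕ) : Int) := by simp
      rw [h1]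
      simp
    rw [hb]
    have hdropP : l.drop P.length = c :: t := by rw [hldecomp, List.drop_left]
    have hdropP1 : l.drop (P.length + 1) = t := by
      have he : l.drop (P.length + 1) = (l.drop P.length).drop 1 := by
        rw [List.drop_drop]
      rw [he, hdropP, List.drop_one, List.tail_cons]
    have hget : l.getD P.length "" = c := pvDrop_head l _ c t hdropP
    have hloop := pvLoop t.length t l P.length le_rfl hdropP1 (by rw [hget]; exact hcc)
    rw [PySem.List.slice_from_one, List.tail_cons]
    rw [hloop, hget]
    unfold pvSpec
    rw [← hPdef, hr]
    rcases eq_or_ne P [] with hPnil | hPnil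
    · simp [hPnil]
    · have hslice : PySem.List.slice l none (some ((P.length : ℕ) : Int)) = P := by
        rw [PySem.List.slice_to_natCast]
        conv_lhs => rw [hldecomp]
        exact List.take_left
      have hp0 : 0 < P.length := List.length_pos_of_ne_nil hPnil
      simp [hln, hPnil, hslice, hp0]

-- ===== VERDICT (by name: the statement is the Claim_ definition above) =====
theorem split_commands_spec : Claim_equal_split_commands := by
  intro l _
  unfold Spec_split_commands
  rw [pvA_eq_spec, pvB_eq_spec]
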